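-- pv_equiv track=rewrite | github.com/Dimaaap/Leetcode | Medium/3839.) Number of Prefix Connected Groups.py | prefix_connected
-- ===== SOURCE A (Python) =====
-- from collections import defaultdict
--
-- def prefix_connected(words: list[str], k: int) -> int:
--     """
--     You are given an array of strings words and an integer k.
--     Two words a and b at distinct indices are prefix-connected if a[0..k-1] == b[0..k-1].
--     A connected group is a set of words such that each pair of words is prefix-connected.
--     Return the number of connected groups that contain at least two words, formed from the given words.
--
--     Note:
--     Words with length less than k cannot join any group and are ignored.
--     Duplicate strings are treated as separate words.
--
--     """
--
--     prefix_count = defaultdict(int)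
--
--     for word in words:
--         if len(word) >= k:
--             prefix = word[:k]
--             prefix_count[prefix] += 1
--     groups = 0
--     for count in prefix_count.values():
--         if count >= 2:
--             groups += 1
--     return groups
-- ===== SOURCE B (Python) =====
-- def prefix_connected(words: list[str], k: int) -> int:
--     prefixes = sorted(w[:k] for w in words if len(w) >= k)
--     groups = 0
--     cur = ""
--     run = 0
--     for p in prefixes:
--         if run > 0 and p == cur:
--             run += 1
--         else:
--             if run >= 2:
--                 groups += 1
--             cur = p
--             run = 1
--     if run >= 2:
--         groups += 1
--     return groups
-- ===== Notes on version B (the rewrite author's own statement) =====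
-- stated objective: alternative
-- what changed: Replaces the defaultdict frequency map with sort-then-scan: collect the k-prefixes of eligible words, sort them, and count maximal runs of length >= 2 in one pass.
import Mathlib
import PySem

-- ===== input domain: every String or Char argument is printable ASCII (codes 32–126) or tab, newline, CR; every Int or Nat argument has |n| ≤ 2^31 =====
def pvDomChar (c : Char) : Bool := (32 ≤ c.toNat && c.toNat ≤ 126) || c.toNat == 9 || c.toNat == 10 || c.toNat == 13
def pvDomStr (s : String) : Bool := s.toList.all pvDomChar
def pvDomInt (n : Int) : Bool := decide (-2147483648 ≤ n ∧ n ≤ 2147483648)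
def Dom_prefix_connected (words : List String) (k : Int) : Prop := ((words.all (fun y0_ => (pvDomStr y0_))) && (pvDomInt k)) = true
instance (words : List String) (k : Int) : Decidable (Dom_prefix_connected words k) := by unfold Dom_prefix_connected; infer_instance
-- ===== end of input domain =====

-- B replaces A's hash-map frequency count by sort-then-scan over the collected prefixes (alternative algorithm, same result).

-- ===== PORT A =====
def prefix_connected (words : List String) (k : Int) : Int :=
  let prefix_count : PySem.Dict String Int :=
    words.foldl (fun d word =>
      if k ≤ PySem.Str.len word then
        d.modify (PySem.Str.slice word none (some k)) 0 (· + 1)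
      else d) PySem.Dict.empty
  prefix_count.values.foldl (fun groups count => if 2 ≤ count then groups + 1 else groups) 0

-- ===== PORT B =====
-- loop state: (groups, cur, run)
def pvStepB (s : Int × String × Int) (p : String) : Int × String × Int :=
  if 0 < s.2.2 ∧ p = s.2.1 then (s.1, s.2.1, s.2.2 + 1)
  else (s.1 + (if 2 ≤ s.2.2 then 1 else 0), p, 1)

def prefix_connected_alt (words : List String) (k : Int) : Int :=
  let prefixes := PySem.List.sorted
    ((words.filter (fun w => k ≤ PySem.Str.len w)).map
      (fun w => PySem.Str.slice w none (some k))) (fun s => s)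
  let s := prefixes.foldl pvStepB (0, "", 0)
  s.1 + (if 2 ≤ s.2.2 then 1 else 0)

-- ===== PRECONDITION & SPEC =====
def Spec_prefix_connected (words : List String) (k : Int) (out : Int) : Prop := out = prefix_connected_alt words k
instance (words : List String) (k : Int) (out : Int) : Decidable (Spec_prefix_connected words k out) := by unfold Spec_prefix_connected; infer_instance

-- ===== CLAIM (what is proved, stated in full; the proofs are below) =====
def Claim_equal_prefix_connected : Prop := ∀ (words : List String) (k : Int), Dom_prefix_connected words k → Spec_prefix_connected words k (prefix_connected words k)

-- ===== LEMMAS AND PROOFS =====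

-- number of distinct elements of m occurring at least twice
def pvN (m : List String) : Int :=
  ((PySem.Set.ofList m).countP (fun p => decide (2 ≤ (m.count p : Int))) : Nat)

lemma pvN_perm {m m' : List String} (h : m.Perm m') : pvN m = pvN m' := by
  unfold pvN
  have hperm : (PySem.Set.ofList m).Perm (PySem.Set.ofList m') := by
    rw [List.perm_ext_iff_of_nodup (PySem.Set.nodup_ofList m) (PySem.Set.nodup_ofList m')]
    intro a
    rw [PySem.Set.mem_ofList, PySem.Set.mem_ofList]
    exact h.mem_iff
  have hc : ∀ p : String, m.count p = m'.count p := fun p => h.count_eq p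
  rw [List.Perm.countP_eq _ hperm]
  congr 2
  funext p
  rw [hc]

lemma pvN_cons (y : String) (ys : List String) :
    pvN (y :: ys) = (if 2 ≤ 1 + (ys.count y : Int) then 1 else 0)
      + pvN (ys.filter (fun p => p ≠ y)) := by
  unfold pvN
  have hnd2 : (y :: PySem.Set.ofList (ys.filter (fun p => p ≠ y))).Nodup := by
    refine List.nodup_cons.mpr ⟨?_, PySem.Set.nodup_ofList _⟩
    intro hmem
    rw [PySem.Set.mem_ofList] at hmem
    simp at hmem
  have hperm : (PySem.Set.ofList (y :: ys)).Perm (y :: PySem.Set.ofList (ys.filter (fun p => p ≠ y))) := by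
    rw [List.perm_ext_iff_of_nodup (PySem.Set.nodup_ofList _) hnd2]
    intro a
    rw [PySem.Set.mem_ofList]
    simp [PySem.Set.mem_ofList]
    by_cases ha : a = y <;> simp [ha]
  rw [List.Perm.countP_eq _ hperm]
  rw [List.countP_cons]
  have hy : (decide (2 ≤ (((y :: ys).count y : Nat) : Int)) : Bool) = decide (2 ≤ 1 + (ys.count y : Int)) := by
    rw [List.count_cons_self]
    push_cast
    congr 1
    rw [Int.add_comm]
  have hrest : List.countP (fun p => decide (2 ≤ (((y :: ys).count p : Nat) : Int))) (PySem.Set.ofList (ys.filter (fun p => p ≠ y)))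
      = List.countP (fun p => decide (2 ≤ (((ys.filter (fun p => p ≠ y)).count p : Nat) : Int))) (PySem.Set.ofList (ys.filter (fun p => p ≠ y))) := by
    apply List.countP_congr
    intro a ha
    rw [PySem.Set.mem_ofList] at ha
    have hne : a ≠ y := by simp at ha; exact ha.2
    rw [List.count_filter (by simp [hne])]
    simp [Ne.symm hne]
  rw [hrest, hy]
  simp only [decide_eq_true_eq, Nat.cast_add, Nat.cast_ite, Nat.cast_one, Nat.cast_zero]
  split_ifs <;> omega

lemma pvGo_spec (l : List String) : ∀ (cur : String) (run groups : Int),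
    0 < run → (∀ y ∈ l, cur ≤ y) → l.Pairwise (· ≤ ·) →
    (l.foldl pvStepB (groups, cur, run)).1
      + (if 2 ≤ (l.foldl pvStepB (groups, cur, run)).2.2 then 1 else 0)
    = groups + ((if 2 ≤ run + (l.count cur : Int) then 1 else 0)
      + pvN (l.filter (fun p => p ≠ cur))) := by
  induction l with
  | nil =>
    intro cur run groups hrun _ _
    simp [pvN, PySem.Set.ofList]
  | cons y ys ih =>
    intro cur run groups hrun hle hpw
    have hcury : cur ≤ y := hle y (by simp)
    have hys_pw : ys.Pairwise (· ≤ ·) := hpw.of_cons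
    have hyys : ∀ z ∈ ys, y ≤ z := (List.pairwise_cons.mp hpw).1
    by_cases hy : y = cur
    · subst hy
      have hstep : pvStepB (groups, y, run) y = (groups, y, run + 1) := by
        simp [pvStepB, hrun]
      rw [List.foldl_cons, hstep]
      rw [ih y (run + 1) groups (by omega) hyys hys_pw]
      have hcnt : ((y :: ys).count y : Int) = (ys.count y : Int) + 1 := by
        rw [List.count_cons_self]; push_cast; ring
      rw [hcnt]
      have : (List.filter (fun p => decide (p ≠ y)) (y :: ys)) = List.filter (fun p => decide (p ≠ y)) ys := by
        simp
      rw [this]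
      congr 3
      exact propext (by omega)
    · have hcurlt : cur < y := lt_of_le_of_ne hcury (Ne.symm hy)
      have hnotmem : cur ∉ y :: ys := by
        intro hmem
        rcases List.mem_cons.mp hmem with h | h
        · exact hy (h.symm)
        · exact absurd (lt_of_lt_of_le hcurlt (hyys _ h)) (lt_irrefl _)
      have hstep : pvStepB (groups, cur, run) y = (groups + (if 2 ≤ run then 1 else 0), y, 1) := by
        simp [pvStepB, hy]
      rw [List.foldl_cons, hstep]
      rw [ih y 1 _ (by omega) hyys hys_pw]
      have hcnt0 : ((y :: ys).count cur : Int) = 0 := by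
        rw [List.count_eq_zero.mpr hnotmem]; simp
      rw [hcnt0]
      have hfil : List.filter (fun p => decide (p ≠ cur)) (y :: ys) = y :: ys := by
        apply List.filter_eq_self.mpr
        intro a ha
        simp
        intro h
        exact hnotmem (h ▸ ha)
      rw [hfil, pvN_cons]
      split_ifs <;> omega

lemma pvA_eq (words : List String) (k : Int) :
    prefix_connected words k
      = pvN ((words.filter (fun w => k ≤ PySem.Str.len w)).map
          (fun w => PySem.Str.slice w none (some k))) := by
  unfold prefix_connected
  set P := (words.filter (fun w => k ≤ PySem.Str.len w)).map
          (fun w => PySem.Str.slice w none (some k)) with hP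
  have h1 : words.foldl (fun d word =>
      if k ≤ PySem.Str.len word then
        d.modify (PySem.Str.slice word none (some k)) 0 (· + 1)
      else d) PySem.Dict.empty = PySem.Dict.counter P := by
    rw [PySem.List.foldl_ite_eq_foldl_filter
      (p := fun w => k ≤ PySem.Str.len w)
      (f := fun (d : PySem.Dict String Int) w =>
        PySem.Dict.modify d (PySem.Str.slice w none (some k)) 0 (fun x => x + 1))]
    rw [PySem.Dict.counter_eq_foldl, hP, List.foldl_map]
  simp only [h1]
  have h2 : (PySem.Dict.counter P).values
      = (PySem.Set.ofList P).map (fun p => ((P.count p : Nat) : Int)) := by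
    show ((PySem.Dict.counter P).items).map Prod.snd = _
    rw [PySem.Dict.items_counter, List.map_map]
    rfl
  rw [h2]
  rw [PySem.List.foldl_ite_add_one (p := fun c => (2:Int) ≤ c)]
  rw [List.countP_map]
  unfold pvN
  rw [Int.zero_add]
  rfl

lemma pvB_eq (words : List String) (k : Int) :
    prefix_connected_alt words k
      = pvN ((words.filter (fun w => k ≤ PySem.Str.len w)).map
          (fun w => PySem.Str.slice w none (some k))) := by
  unfold prefix_connected_alt
  set P := (words.filter (fun w => k ≤ PySem.Str.len w)).map
          (fun w => PySem.Str.slice w none (some k)) with hP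
  have hperm := PySem.List.sorted_perm P (fun s => s) false
  have hpw := PySem.List.sorted_pairwise P (fun s => s)
  rcases hS : PySem.List.sorted P (fun s => s) false with _ | ⟨y, t⟩
  · rw [hS] at hperm
    have : P = [] := hperm.symm.eq_nil
    rw [← pvN_perm hperm]
    simp [pvN, PySem.Set.ofList]
  · rw [hS] at hperm hpw
    dsimp only
    have hstep : pvStepB (0, "", 0) y = (0, y, 1) := by
      norm_num [pvStepB]
    rw [List.foldl_cons, hstep]
    have h1 := pvGo_spec t y 1 0 (by omega)
      (List.pairwise_cons.mp hpw).1 hpw.of_cons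
    rw [h1, ← pvN_perm hperm, pvN_cons]
    omega

-- ===== VERDICT (by name: the statement is the Claim_ definition above) =====
theorem prefix_connected_spec : Claim_equal_prefix_connected := by
  intro words k _
  unfold Spec_prefix_connected
  rw [pvA_eq, pvB_eq]
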